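-- pv_equiv track=rewrite | github.com/m0s0lawrence/ApoTrack | tallyedit.py | parse_mpileup_line
-- ===== SOURCE A (Python) =====
-- def parse_mpileup_line(line):
--     split_line = line.split("\t")
--     ref_base = split_line[2].upper()
--
--     bam_count = (len(split_line) - 3) // 3
--     total_basecalls = [0] * bam_count
--     total_edits = [0] * bam_count
--
--     for i in range(bam_count):
--         basecalls = split_line[4 + i * 3].upper()
--         if ref_base in {'C', 'G'}:
--             for basecall in basecalls:
--                 if basecall in {'.', ',', 'A', 'T', 'G', 'C'}:
--                     total_basecalls[i] += 1
--                     if (ref_base == 'C' and basecall == 'T') or (ref_base == 'G' and basecall == 'A'):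
--                         total_edits[i] += 1
--
--     return ref_base, total_edits, total_basecalls
-- ===== SOURCE B (Python) =====
-- def parse_mpileup_line(line):
--     fields = line.split("\t")
--     ref_base = fields[2].upper()
--     bam_count = (len(fields) - 3) // 3
--     if ref_base not in ('C', 'G'):
--         return ref_base, [0] * bam_count, [0] * bam_count
--     edit_base = 'T' if ref_base == 'C' else 'A'
--     total_basecalls = []
--     total_edits = []
--     for i in range(bam_count):
--         freq = {}
--         for c in fields[4 + i * 3].upper():
--             freq[c] = freq.get(c, 0) + 1
--         total_basecalls.append(sum(freq.get(s, 0) for s in '.,ATGC'))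
--         total_edits.append(freq.get(edit_base, 0))
--     return ref_base, total_edits, total_basecalls
-- ===== Notes on version B (the rewrite author's own statement) =====
-- stated objective: idiomatic
-- what changed: B replaces A's per-character branching scan with a tabulate-then-lookup pass: it builds a per-sample character frequency table once, then reads the basecall total as the sum of the six valid symbols' counts and the edit total as the count of the single edit base, hoisting the reference-base test and edit-base choice out of the loop.
import Mathlib
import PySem

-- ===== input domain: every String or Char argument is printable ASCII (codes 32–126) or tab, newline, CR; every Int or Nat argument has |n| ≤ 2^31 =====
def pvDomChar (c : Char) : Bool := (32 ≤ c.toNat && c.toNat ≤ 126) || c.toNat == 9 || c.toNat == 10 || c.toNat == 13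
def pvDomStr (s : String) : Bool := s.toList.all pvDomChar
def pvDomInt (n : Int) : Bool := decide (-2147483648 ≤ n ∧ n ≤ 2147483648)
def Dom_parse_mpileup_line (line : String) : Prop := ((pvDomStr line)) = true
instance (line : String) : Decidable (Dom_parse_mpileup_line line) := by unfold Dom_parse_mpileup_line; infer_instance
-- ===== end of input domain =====

-- B replaces A's per-character branching scan by a tabulate-then-lookup pass: a frequency
-- table per sample, totals read off by lookup (objective: idiomatic; same asymptotic cost).

-- ===== PORT A =====
def parse_mpileup_line (line : String) : String × List Int × List Int :=
  let split_line := (PySem.Str.split? line "\t").getD []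
  let ref_base := PySem.Str.upper ((PySem.List.pyGet? split_line 2).getD "")
  let bam_count := PySem.Int.floordiv ((split_line.length : Int) - 3) 3
  let total_basecalls := List.replicate bam_count.toNat (0 : Int)
  let total_edits := List.replicate bam_count.toNat (0 : Int)
  let st :=
    (PySem.List.pyRange 0 bam_count 1).foldl
      (fun (st : List Int × List Int) i =>
        let basecalls := PySem.Str.upper ((PySem.List.pyGet? split_line (4 + i * 3)).getD "")
        if ref_base = "C" ∨ ref_base = "G" then
          basecalls.toList.foldl
            (fun (st : List Int × List Int) basecall =>
              if basecall = '.' ∨ basecall = ',' ∨ basecall = 'A' ∨ basecall = 'T' ∨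
                  basecall = 'G' ∨ basecall = 'C' then
                let st := (st.1.set i.toNat (st.1.getD i.toNat 0 + 1), st.2)
                if (ref_base = "C" ∧ basecall = 'T') ∨ (ref_base = "G" ∧ basecall = 'A') then
                  (st.1, st.2.set i.toNat (st.2.getD i.toNat 0 + 1))
                else st
              else st) st
        else st)
      (total_basecalls, total_edits)
  (ref_base, st.2, st.1)

-- ===== PORT B =====
def parse_mpileup_line_alt (line : String) : String × List Int × List Int :=
  let fields := (PySem.Str.split? line "\t").getD []
  let ref_base := PySem.Str.upper ((PySem.List.pyGet? fields 2).getD "")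
  let bam_count := PySem.Int.floordiv ((fields.length : Int) - 3) 3
  if ¬ (ref_base = "C" ∨ ref_base = "G") then
    (ref_base, List.replicate bam_count.toNat (0 : Int), List.replicate bam_count.toNat (0 : Int))
  else
    let edit_base := if ref_base = "C" then 'T' else 'A'
    let st :=
      (PySem.List.pyRange 0 bam_count 1).foldl
        (fun (acc : List Int × List Int) i =>
          let freq :=
            (PySem.Str.upper ((PySem.List.pyGet? fields (4 + i * 3)).getD "")).toList.foldl
              (fun (d : PySem.Dict Char Int) c => d.modify c 0 (· + 1)) (PySem.Dict.mk [])
          (acc.1 ++ [(".,ATGC".toList.map (fun s => freq.getD s 0)).sum],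
           acc.2 ++ [freq.getD edit_base 0]))
        ([], [])
    (ref_base, st.2, st.1)

-- ===== PRECONDITION & SPEC =====
-- Pre_ excludes lines with fewer than three tab-separated fields, on which Python A raises IndexError.
def Pre_parse_mpileup_line (line : String) : Prop :=
  3 ≤ ((PySem.Str.split? line "\t").getD []).length
instance (line : String) : Decidable (Pre_parse_mpileup_line line) := by
  unfold Pre_parse_mpileup_line; infer_instance

def pvWitness_parse_mpileup_line : String := "chr1\t10\tc\t2\t.T,\tII"

def Spec_parse_mpileup_line (line : String) (out : String × List Int × List Int) : Prop := out = parse_mpileup_line_alt line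
instance (line : String) (out : String × List Int × List Int) : Decidable (Spec_parse_mpileup_line line out) := by unfold Spec_parse_mpileup_line; infer_instance

-- ===== CLAIM (what is proved, stated in full; the proofs are below) =====
def Claim_equal_parse_mpileup_line : Prop := ∀ (line : String), Dom_parse_mpileup_line line → Pre_parse_mpileup_line line → Spec_parse_mpileup_line line (parse_mpileup_line line)

-- ===== LEMMAS AND PROOFS =====

-- the six symbols counted as basecalls
def pvIsCall (c : Char) : Bool :=
  c == '.' || c == ',' || c == 'A' || c == 'T' || c == 'G' || c == 'C'

-- add m to entry k (the `l[k] += m` pattern; out-of-range k is a no-op, never reached)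
def pvBump (l : List Int) (k : Nat) (m : Int) : List Int := l.set k (l.getD k 0 + m)

-- characters iterated per sample and the two per-sample totals, shared by the proofs
def pvCalls (fields : List String) (j : Int) : List Char :=
  (PySem.Str.upper ((PySem.List.pyGet? fields (4 + j * 3)).getD "")).toList

def pvEdit (r : String) : Char := if r = "C" then 'T' else 'A'

def pvTB (fields : List String) (j : Int) : Int := ((pvCalls fields j).countP pvIsCall : Nat)

def pvTE (fields : List String) (r : String) (j : Int) : Int := ((pvCalls fields j).count (pvEdit r) : Nat)

theorem pvBump_zero (l : List Int) (k : Nat) : pvBump l k 0 = l := by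
  unfold pvBump
  rcases Nat.lt_or_ge k l.length with h | h
  · simp [List.getElem?_eq_getElem h]
  · simp [List.set_eq_of_length_le h]

theorem pvBump_bump (l : List Int) (k : Nat) (a b : Int) :
    pvBump (pvBump l k a) k b = pvBump l k (a + b) := by
  unfold pvBump
  rcases Nat.lt_or_ge k l.length with h | h
  · simp [h, List.getElem_set_self]
    ring_nf
  · simp [List.set_eq_of_length_le, h]

theorem pvFoldl_const {A B : Type} (l : List A) (init : B) :
    l.foldl (fun s _ => s) init = init := by
  induction l generalizing init <;> simp_all [List.foldl]

theorem pvInnerA (r : String) (hr : r = "C" ∨ r = "G") (k : Nat) (cs : List Char)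
    (st : List Int × List Int) :
    cs.foldl
      (fun (st : List Int × List Int) basecall =>
        if basecall = '.' ∨ basecall = ',' ∨ basecall = 'A' ∨ basecall = 'T' ∨
            basecall = 'G' ∨ basecall = 'C' then
          let st := (st.1.set k (st.1.getD k 0 + 1), st.2)
          if (r = "C" ∧ basecall = 'T') ∨ (r = "G" ∧ basecall = 'A') then
            (st.1, st.2.set k (st.2.getD k 0 + 1))
          else st
        else st) st
    = (pvBump st.1 k (cs.countP pvIsCall : Nat), pvBump st.2 k ((cs.count (pvEdit r) : Nat))) := by
  induction cs generalizing st with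
  | nil => simp [pvBump_zero]
  | cons c cs ih =>
    have hpe : pvIsCall (pvEdit r) = true := by
      rcases hr with h | h <;> subst h <;> decide
    have hedit_iff : ((r = "C" ∧ c = 'T') ∨ (r = "G" ∧ c = 'A')) ↔ c = pvEdit r := by
      rcases hr with h | h <;> subst h <;> simp [pvEdit]
    by_cases hcall : c = '.' ∨ c = ',' ∨ c = 'A' ∨ c = 'T' ∨ c = 'G' ∨ c = 'C'
    · have hpc : pvIsCall c = true := by
        rcases hcall with h|h|h|h|h|h <;> subst h <;> decide
      by_cases he : c = pvEdit r
      · simp only [List.foldl_cons, if_pos hcall, hedit_iff, if_pos he]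
        rw [ih]
        show (pvBump (pvBump st.1 k 1) k _, pvBump (pvBump st.2 k 1) k _) = _
        rw [pvBump_bump, pvBump_bump]
        simp only [Prod.mk.injEq]
        constructor <;> congr 1 <;>
          simp [List.countP_cons, List.count_cons, hpc, he, hpe] <;> push_cast <;> omega
      · simp only [List.foldl_cons, if_pos hcall, hedit_iff, if_neg he]
        show (cs.foldl _ (pvBump st.1 k 1, st.2)) = _
        rw [ih]
        show (pvBump (pvBump st.1 k 1) k _, pvBump st.2 k _) = _
        rw [pvBump_bump]
        simp only [Prod.mk.injEq]
        constructor <;> congr 1 <;>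
          simp [List.countP_cons, List.count_cons, hpc, he] <;> push_cast <;> omega
    · have hpc : pvIsCall c = false := by
        simp only [pvIsCall, Bool.or_eq_false_iff, beq_eq_false_iff_ne, ne_eq]
        push_neg at hcall
        tauto
      have hne : c ≠ pvEdit r := by
        intro h
        rcases hr with h' | h' <;> subst h' <;> simp [pvEdit] at h <;> subst h <;> tauto
      simp only [List.foldl_cons, if_neg hcall]
      rw [ih]
      simp [List.countP_cons, List.count_cons, hpc, hne]

theorem pvBump_mapIf (n k : Nat) (hk : k < n) (f : Nat → Int) :
    pvBump ((List.range n).map fun j => if j < k then f j else 0) k (f k)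
      = (List.range n).map fun j => if j < k + 1 then f j else 0 := by
  apply List.ext_getElem
  · simp [pvBump]
  · intro j hj hj'
    simp only [List.length_map, List.length_range] at hj'
    unfold pvBump
    have hgd : ((List.range n).map fun j => if j < k then f j else 0).getD k 0 = 0 := by
      rw [List.getD_eq_getElem _ _ (by simpa using hk)]
      simp [List.getElem_map, hk]
    simp only [hgd, zero_add]
    by_cases h : j = k
    · subst h
      rw [List.getElem_set_self (by simpa using hk)]
      simp [hj']
    · rw [List.getElem_set_ne (by omega)]
      simp only [List.getElem_map, List.getElem_range]
      have : j < k ↔ j < k + 1 := by omega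
      simp [this]

theorem pvOuterA (fields : List String) (r : String) (hr : r = "C" ∨ r = "G") (n k : Nat)
    (hk : k ≤ n) :
    (PySem.List.pyRange 0 (k : Int) 1).foldl
      (fun (st : List Int × List Int) i =>
        let basecalls := PySem.Str.upper ((PySem.List.pyGet? fields (4 + i * 3)).getD "")
        if r = "C" ∨ r = "G" then
          basecalls.toList.foldl
            (fun (st : List Int × List Int) basecall =>
              if basecall = '.' ∨ basecall = ',' ∨ basecall = 'A' ∨ basecall = 'T' ∨
                  basecall = 'G' ∨ basecall = 'C' then
                let st := (st.1.set i.toNat (st.1.getD i.toNat 0 + 1), st.2)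
                if (r = "C" ∧ basecall = 'T') ∨ (r = "G" ∧ basecall = 'A') then
                  (st.1, st.2.set i.toNat (st.2.getD i.toNat 0 + 1))
                else st
              else st) st
        else st)
      (List.replicate n (0 : Int), List.replicate n (0 : Int))
    = ((List.range n).map fun j => if j < k then pvTB fields j else 0,
       (List.range n).map fun j => if j < k then pvTE fields r j else 0) := by
  induction k with
  | zero =>
    rw [PySem.List.pyRange_one_eq_nil (by simp)]
    simp [List.foldl_nil, List.map_const', List.eq_replicate_iff]
  | succ k ih =>
    have hk' : k ≤ n := Nat.le_of_succ_le hk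
    have : ((k + 1 : Nat) : Int) = (k : Int) + 1 := by push_cast; ring
    rw [this, PySem.List.pyRange_one_succ_right (by positivity), List.foldl_append,
      ih hk']
    simp only [List.foldl_cons, List.foldl_nil, if_pos hr]
    rw [pvInnerA r hr]
    simp only [Int.toNat_natCast]
    rw [show (PySem.Str.upper ((PySem.List.pyGet? fields (4 + (k : Int) * 3)).getD "")).toList
        = pvCalls fields (k : Int) from rfl]
    rw [show ((pvCalls fields (k:Int)).countP pvIsCall : Int) = pvTB fields (k:Int) from rfl,
        show ((pvCalls fields (k:Int)).count (pvEdit r) : Int) = pvTE fields r (k:Int) from rfl]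
    rw [pvBump_mapIf n k (by omega), pvBump_mapIf n k (by omega)]

theorem pvFreq_getD (cs : List Char) (c : Char) :
    (cs.foldl (fun (d : PySem.Dict Char Int) c => d.modify c 0 (· + 1)) (PySem.Dict.mk [])).getD c 0
      = (cs.count c : Nat) := by
  rw [PySem.Dict.getD_foldl_modify_add_one]
  simp [PySem.Dict.getD, PySem.Dict.get?, PySem.Dict.mk]

theorem pvSumSix (cs : List Char) :
    ((['.', ',', 'A', 'T', 'G', 'C'] : List Char).map fun s => ((cs.count s : Nat) : Int)).sum
      = ((cs.countP pvIsCall : Nat) : Int) := by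
  induction cs with
  | nil => simp
  | cons c cs ih =>
    simp only [List.map_cons, List.map_nil, List.sum_cons, List.sum_nil] at ih ⊢
    by_cases h : pvIsCall c = true
    · have h' : ((((c = '.' ∨ c = ',') ∨ c = 'A') ∨ c = 'T') ∨ c = 'G') ∨ c = 'C' := by
        simpa [pvIsCall] using h
      rcases h' with ((((h1|h1)|h1)|h1)|h1)|h1 <;> subst h1 <;>
        simp [List.count_cons, List.countP_cons, pvIsCall] <;> push_cast <;> omega
    · have h6 : c ≠ '.' ∧ c ≠ ',' ∧ c ≠ 'A' ∧ c ≠ 'T' ∧ c ≠ 'G' ∧ c ≠ 'C' := by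
        simp only [pvIsCall, Bool.or_eq_true, beq_iff_eq] at h
        tauto
      simp [List.count_cons, List.countP_cons, h, h6.1, h6.2.1, h6.2.2.1, h6.2.2.2.1,
        h6.2.2.2.2.1, h6.2.2.2.2.2, ih]
      omega

theorem pvOuterB (fields : List String) (r : String) (n : Nat) :
    (PySem.List.pyRange 0 (n : Int) 1).foldl
      (fun (acc : List Int × List Int) i =>
        let freq :=
          (PySem.Str.upper ((PySem.List.pyGet? fields (4 + i * 3)).getD "")).toList.foldl
            (fun (d : PySem.Dict Char Int) c => d.modify c 0 (· + 1)) (PySem.Dict.mk [])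
        (acc.1 ++ [(".,ATGC".toList.map fun s => freq.getD s 0).sum],
         acc.2 ++ [freq.getD (if r = "C" then 'T' else 'A') 0]))
      ([], [])
    = ((List.range n).map fun (j : Nat) => pvTB fields (j : Int),
       (List.range n).map fun (j : Nat) => pvTE fields r (j : Int)) := by
  rw [PySem.List.foldl_prod_mk
      (fun (a : List Int) (i : Int) =>
        a ++ [(".,ATGC".toList.map fun s =>
          (((PySem.Str.upper ((PySem.List.pyGet? fields (4 + i * 3)).getD "")).toList.foldl
            (fun (d : PySem.Dict Char Int) c => d.modify c 0 (· + 1)) (PySem.Dict.mk [])).getD s 0)).sum])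
      (fun (a : List Int) (i : Int) =>
        a ++ [((PySem.Str.upper ((PySem.List.pyGet? fields (4 + i * 3)).getD "")).toList.foldl
            (fun (d : PySem.Dict Char Int) c => d.modify c 0 (· + 1)) (PySem.Dict.mk [])).getD (if r = "C" then 'T' else 'A') 0])]
  rw [PySem.List.foldl_append_singleton_eq_map, PySem.List.foldl_append_singleton_eq_map]
  simp only [List.nil_append]
  rw [PySem.List.pyRange_one 0 (n : Int)]
  simp only [Int.sub_zero, Int.toNat_natCast, List.map_map]
  simp only [Prod.mk.injEq]
  refine ⟨?_, ?_⟩ <;> apply List.map_congr_left <;> intro j hj <;>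
    simp only [Function.comp, zero_add, pvTB, pvTE, pvCalls]
  · rw [show (".,ATGC".toList) = ['.', ',', 'A', 'T', 'G', 'C'] from rfl]
    simp only [pvFreq_getD]
    exact pvSumSix _
  · rw [show (if r = "C" then 'T' else 'A') = pvEdit r from rfl, pvFreq_getD]

-- ===== VERDICT (by name: the statement is the Claim_ definition above) =====
theorem parse_mpileup_line_spec : Claim_equal_parse_mpileup_line := by
  intro line _ hpre
  unfold Pre_parse_mpileup_line at hpre
  unfold Spec_parse_mpileup_line
  simp only [parse_mpileup_line, parse_mpileup_line_alt]
  obtain ⟨n, hn⟩ : ∃ n : Nat,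
      PySem.Int.floordiv ((((PySem.Str.split? line "\t").getD []).length : Int) - 3) 3 = (n : Int) := by
    refine ⟨(PySem.Int.floordiv ((((PySem.Str.split? line "\t").getD []).length : Int) - 3) 3).toNat, ?_⟩
    rw [Int.toNat_of_nonneg]
    rw [PySem.Int.floordiv_eq_ediv_of_pos (by norm_num)]
    apply Int.ediv_nonneg _ (by norm_num)
    have : (3 : Int) ≤ (((PySem.Str.split? line "\t").getD []).length : Int) := by exact_mod_cast hpre
    omega
  rw [hn]
  by_cases hr : PySem.Str.upper ((PySem.List.pyGet? ((PySem.Str.split? line "\t").getD []) 2).getD "")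
      = "C" ∨ PySem.Str.upper ((PySem.List.pyGet? ((PySem.Str.split? line "\t").getD []) 2).getD "") = "G"
  · rw [if_neg (not_not_intro hr)]
    simp only [Int.toNat_natCast]
    rw [pvOuterA ((PySem.Str.split? line "\t").getD []) _ hr n n (le_refl n)]
    rw [pvOuterB ((PySem.Str.split? line "\t").getD []) _ n]
    simp only [Prod.mk.injEq]
    refine ⟨trivial, ?_, ?_⟩ <;> apply List.map_congr_left <;> intro j hj <;>
      simp only [List.mem_range] at hj <;> simp [hj]
  · rw [if_pos hr]
    simp only [if_neg hr]
    rw [pvFoldl_const]
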